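-- pv_equiv track=rewrite | github.com/chiarasabaini/3CI_assignments | INI/py/257_fsm_even_parity3.py | fsa_even_parity
-- ===== SOURCE A (Python) =====
-- def fsa_even_parity(s, symbol='1', alphabet='01', check_input=False):
--     """Returns True if s has an even number of occurrency of a simbol.
--     Otherwise False.
--     If it founds that doesn't belog to the specified alphabeth,
--     raises an exception with the message 'Input simbol not valid'
--
--     >>> fsa_even_parity("011101010", '0')
--     True
--     >>> fsa_even_parity("011101011", '1')
--     True
--     >>> fsa_even_parity("011101X010", '1')
--     True
--     >>> fsa_even_parity("011101X010", '1', check_input=False)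
--     False
--     >>> from string import digits
--     >>> fsa_even_parity("Python 4 all", "a", alphabet=digits)
--     True
--     """
--
--     status = "S1"
--
--     for char in s:
--         if char in alphabet:
--             pass
--             if char == symbol:
--                 if status == "S1":
--                     status = "S2"
--                 else:
--                     status = "S1"
--         elif check_input:
--             alphabet_desc = str(tuple(alphabet)).replace("(", "{").replace(")", "}").replace("'", "")
--             raise Exception(f"Input simbol not valid (alphabet = {tuple(alphabet_desc)})") # Runtime Error
--
--     return status == "S1"
-- ===== SOURCE B (Python) =====
-- def fsa_even_parity(s, symbol='1', alphabet='01', check_input=False):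
--     # Two phases: validate first (same exception as A), then count parity arithmetically.
--     if check_input:
--         for char in s:
--             if char not in alphabet:
--                 alphabet_desc = str(tuple(alphabet)).replace("(", "{").replace(")", "}").replace("'", "")
--                 raise Exception(f"Input simbol not valid (alphabet = {tuple(alphabet_desc)})")
--     count = sum(1 for c in s if c in alphabet and c == symbol)
--     return count % 2 == 0
-- ===== Notes on version B (the rewrite author's own statement) =====
-- stated objective: simpler
-- what changed: Replaces the interleaved S1/S2 FSM toggle loop with two separate phases: an upfront validation scan (same exception) and a plain occurrence count whose parity (count % 2 == 0) is the result.
import Mathlib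
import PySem

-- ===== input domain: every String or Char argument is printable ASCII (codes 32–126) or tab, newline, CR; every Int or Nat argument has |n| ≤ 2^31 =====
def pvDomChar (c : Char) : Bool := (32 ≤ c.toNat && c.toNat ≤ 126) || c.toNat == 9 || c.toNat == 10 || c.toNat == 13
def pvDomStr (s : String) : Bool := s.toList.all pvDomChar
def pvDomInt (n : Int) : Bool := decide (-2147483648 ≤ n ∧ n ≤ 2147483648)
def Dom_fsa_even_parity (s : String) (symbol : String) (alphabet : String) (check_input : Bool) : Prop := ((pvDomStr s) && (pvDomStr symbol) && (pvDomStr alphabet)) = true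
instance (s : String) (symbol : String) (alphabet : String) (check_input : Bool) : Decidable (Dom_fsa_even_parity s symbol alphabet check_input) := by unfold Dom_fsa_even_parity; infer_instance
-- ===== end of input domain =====

-- B separates validation from counting and replaces the S1/S2 state toggle with count % 2 (simpler decomposition, same cost).

-- ===== PORT A =====
-- A's FSM loop; `none` = the `raise Exception(...)` branch (excluded by Pre_).
def fsaLoopA (symbol alphabet : String) (check_input : Bool) : List Char → String → Option String
  | [], status => some status
  | c :: rest, status =>
    if alphabet.toList.contains c then
      fsaLoopA symbol alphabet check_input rest
        (if String.mk [c] == symbol then (if status == "S1" then "S2" else "S1") else status)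
    else if check_input then none
    else fsaLoopA symbol alphabet check_input rest status

def fsa_even_parity (s : String) (symbol : String) (alphabet : String) (check_input : Bool) : Bool :=
  match fsaLoopA symbol alphabet check_input s.toList "S1" with
  | some status => status == "S1"
  | none => false  -- exception path; outside Pre_

-- ===== PORT B =====
def fsa_even_parity_alt (s : String) (symbol : String) (alphabet : String) (check_input : Bool) : Bool :=
  if check_input && s.toList.any (fun c => !alphabet.toList.contains c) then
    false  -- validation phase raises; outside Pre_
  else
    (s.toList.countP (fun c => alphabet.toList.contains c && String.mk [c] == symbol)) % 2 == 0

-- ===== PRECONDITION & SPEC =====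
-- Pre_ excludes exactly the inputs on which A raises Exception: check_input=True and some char of s outside alphabet.
def Pre_fsa_even_parity (s : String) (symbol : String) (alphabet : String) (check_input : Bool) : Prop :=
  check_input = true → s.toList.all (fun c => alphabet.toList.contains c) = true
instance (s : String) (symbol : String) (alphabet : String) (check_input : Bool) : Decidable (Pre_fsa_even_parity s symbol alphabet check_input) := by unfold Pre_fsa_even_parity; infer_instance

def pvWitness_fsa_even_parity : String × String × String × Bool := ("0110", "1", "01", true)

def Spec_fsa_even_parity (s : String) (symbol : String) (alphabet : String) (check_input : Bool) (out : Bool) : Prop := out = fsa_even_parity_alt s symbol alphabet check_input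
instance (s : String) (symbol : String) (alphabet : String) (check_input : Bool) (out : Bool) : Decidable (Spec_fsa_even_parity s symbol alphabet check_input out) := by unfold Spec_fsa_even_parity; infer_instance

-- ===== CLAIM (what is proved, stated in full; the proofs are below) =====
def Claim_equal_fsa_even_parity : Prop := ∀ (s : String) (symbol : String) (alphabet : String) (check_input : Bool), Dom_fsa_even_parity s symbol alphabet check_input → Pre_fsa_even_parity s symbol alphabet check_input → Spec_fsa_even_parity s symbol alphabet check_input (fsa_even_parity s symbol alphabet check_input)

-- ===== LEMMAS AND PROOFS =====

-- Loop invariant: under Pre_, A's loop returns a status whose "S1"-ness is the start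
-- status's "S1"-ness flipped once per counted symbol occurrence.
theorem fsaLoopA_eq (symbol alphabet : String) (check_input : Bool) :
    ∀ (l : List Char) (status : String),
      (check_input = true → ∀ c ∈ l, c ∈ alphabet.toList) →
      ∃ st, fsaLoopA symbol alphabet check_input l status = some st ∧
        (st == "S1") = ((status == "S1") == ((l.countP (fun c => alphabet.toList.contains c && String.mk [c] == symbol)) % 2 == 0)) := by
  intro l
  induction l with
  | nil =>
    intro status _
    exact ⟨status, rfl, by simp⟩
  | cons c rest ih =>
    intro status hpre
    have hpre' : check_input = true → ∀ c' ∈ rest, c' ∈ alphabet.toList :=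
      fun h c' hc' => hpre h c' (List.mem_cons_of_mem _ hc')
    by_cases hc : c ∈ alphabet.toList
    · by_cases hs : (String.mk [c] == symbol) = true
      · obtain ⟨st, hst, hval⟩ := ih (if status == "S1" then "S2" else "S1") hpre'
        refine ⟨st, by simpa [fsaLoopA, hc, hs] using hst, ?_⟩
        rw [hval]
        have hcount : (c :: rest).countP (fun c => alphabet.toList.contains c && String.mk [c] == symbol)
            = rest.countP (fun c => alphabet.toList.contains c && String.mk [c] == symbol) + 1 := by
          simp [List.countP_cons, hc, hs]
        rw [hcount]
        generalize (rest.countP (fun c => alphabet.toList.contains c && String.mk [c] == symbol)) = n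
        rcases Nat.mod_two_eq_zero_or_one n with h | h <;> by_cases hS : status = "S1" <;>
          simp [hS, Nat.add_mod, h]
      · obtain ⟨st, hst, hval⟩ := ih status hpre'
        refine ⟨st, by simpa [fsaLoopA, hc, hs] using hst, ?_⟩
        rw [hval]
        have hcount : (c :: rest).countP (fun c => alphabet.toList.contains c && String.mk [c] == symbol)
            = rest.countP (fun c => alphabet.toList.contains c && String.mk [c] == symbol) := by
          simp [List.countP_cons, hs]
        rw [hcount]
    · -- c not in alphabet: Pre_ forces check_input = false
      have hci : check_input = false := by
        cases hh : check_input
        · rfl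
        · exact absurd (hpre hh c List.mem_cons_self) hc
      obtain ⟨st, hst, hval⟩ := ih status hpre'
      refine ⟨st, by simpa [fsaLoopA, hc, hci] using hst, ?_⟩
      rw [hval]
      have hcount : (c :: rest).countP (fun c => alphabet.toList.contains c && String.mk [c] == symbol)
          = rest.countP (fun c => alphabet.toList.contains c && String.mk [c] == symbol) := by
        simp [List.countP_cons, hc]
      rw [hcount]

-- ===== VERDICT (by name: the statement is the Claim_ definition above) =====
theorem fsa_even_parity_spec : Claim_equal_fsa_even_parity := by
  intro s symbol alphabet check_input _ hpre
  have hpre' : check_input = true → ∀ c ∈ s.toList, c ∈ alphabet.toList := by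
    intro h c hc
    have := hpre h
    simp only [List.all_eq_true] at this
    simpa using this c hc
  unfold Spec_fsa_even_parity fsa_even_parity fsa_even_parity_alt
  obtain ⟨st, hst, hval⟩ := fsaLoopA_eq symbol alphabet check_input s.toList "S1" hpre' 
  rw [hst]
  have hguard : (check_input && s.toList.any (fun c => !alphabet.toList.contains c)) = false := by
    cases hci : check_input
    · simp
    · simp only [Bool.true_and, List.any_eq_false]
      intro c hc
      simp [hpre' hci c hc]
  rw [hguard]
  simpa using hval
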